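-- pv_equiv track=rewrite | github.com/rasyidstat/python-iseng | seq_rev.py | seq_rev
-- ===== SOURCE A (Python) =====
-- def seq_rev(n, p):
--     a = list(range(n))
--     res = []
--     for i in range(len(p)):
--         if len(p[i]) == 2:
--             a[p[i][0]:(p[i][1]+1)] = a[p[i][0]:(p[i][1]+1)][::-1]
--         elif len(p[i]) == 1:
--             res = res + [a[p[i][0]]]
--     return(sum(res))
-- ===== SOURCE B (Python) =====
-- def seq_rev(n, p):
--     # Instead of materialising the array and reversing slices, map each queried
--     # index backwards through the earlier reversals; the initial array is the
--     # identity, so the mapped index IS the value.  No array is ever built.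
--     def bound(i):
--         return max(0, i + n) if i < 0 else min(i, n)
--     total = 0
--     for t in range(len(p)):
--         if len(p[t]) == 1:
--             q = p[t][0]
--             if q < 0:
--                 q += n
--             for s in range(t - 1, -1, -1):
--                 o = p[s]
--                 if len(o) == 2:
--                     lo = bound(o[0])
--                     hi = bound(o[1] + 1)
--                     if lo <= q < hi:
--                         q = lo + hi - 1 - q
--             total += q
--     return total
-- ===== Notes on version B (the rewrite author's own statement) =====
-- stated objective: alternative
-- what changed: B drops A's materialised array (which A rebuilds with an O(n) slice copy per reversal): for each query it maps the queried index backwards through the earlier reversals arithmetically, so it trades A's O(k*n) array work for O(q*k) index arithmetic and O(1) extra space.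
import Mathlib
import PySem

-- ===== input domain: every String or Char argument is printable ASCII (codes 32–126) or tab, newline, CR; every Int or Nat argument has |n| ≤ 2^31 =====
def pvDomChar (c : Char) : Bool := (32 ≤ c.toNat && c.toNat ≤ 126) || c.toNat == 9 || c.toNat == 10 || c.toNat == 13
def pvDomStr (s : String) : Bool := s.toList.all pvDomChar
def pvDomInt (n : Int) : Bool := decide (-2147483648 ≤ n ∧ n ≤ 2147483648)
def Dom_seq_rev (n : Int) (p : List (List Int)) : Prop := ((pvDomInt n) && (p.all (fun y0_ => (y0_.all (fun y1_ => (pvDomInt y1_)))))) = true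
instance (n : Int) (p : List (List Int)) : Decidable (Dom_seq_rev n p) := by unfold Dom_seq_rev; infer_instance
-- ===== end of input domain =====

-- B replaces A's array simulation (a fresh slice copy per reversal op) by mapping each
-- queried index backwards through the earlier reversals, using no array at all.

-- ===== PORT A =====
-- Hand port of the slice assignment `a[l:r+1] = a[l:r+1][::-1]` (PySem has no slice
-- assignment). Exact: Python replaces the elements the clamped slice [lo,hi) denotes
-- with the reversed slice; when that slice is empty the list is unchanged.
def revSlice (a : List Int) (l r : Int) : List Int :=
  if PySem.List.clampIdx a.length (r + 1) ≤ PySem.List.clampIdx a.length l then a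
  else
    a.take (PySem.List.clampIdx a.length l)
      ++ ((a.drop (PySem.List.clampIdx a.length l)).take
            (PySem.List.clampIdx a.length (r + 1) - PySem.List.clampIdx a.length l)).reverse
      ++ a.drop (PySem.List.clampIdx a.length (r + 1))

def seq_revStep (st : List Int × List Int) (op : List Int) : List Int × List Int :=
  if op.length = 2 then (revSlice st.1 (op.getD 0 0) (op.getD 1 0), st.2)
  else if op.length = 1 then
    -- a[p[i][0]]: pyGetD is exact under Pre_'s Raise.InRange side condition
    (st.1, st.2 ++ [PySem.List.pyGetD st.1 (op.getD 0 0) 0])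
  else st

def seq_rev (n : Int) (p : List (List Int)) : Int :=
  ((p.foldl seq_revStep (PySem.List.pyRange 0 n 1, [])).2).sum

-- ===== PORT B =====
def pyBoundB (n i : Int) : Int := if i < 0 then max 0 (i + n) else min i n

def applyRev (n : Int) (o : List Int) (q : Int) : Int :=
  if o.length = 2 then
    if pyBoundB n (o.getD 0 0) ≤ q ∧ q < pyBoundB n (o.getD 1 0 + 1) then
      pyBoundB n (o.getD 0 0) + pyBoundB n (o.getD 1 0 + 1) - 1 - q
    else q
  else q

def altGo (n : Int) (pre rest : List (List Int)) (total : Int) : Int :=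
  match rest with
  | [] => total
  | op :: rest' =>
    if op.length = 1 then
      altGo n (pre ++ [op]) rest'
        (total + pre.foldr (applyRev n)
          (if op.getD 0 0 < 0 then op.getD 0 0 + n else op.getD 0 0))
    else altGo n (pre ++ [op]) rest' total

def seq_rev_alt (n : Int) (p : List (List Int)) : Int := altGo n [] p 0

-- ===== PRECONDITION & SPEC =====
-- Pre_ excludes exactly the inputs on which A raises IndexError: a query op [q]
-- whose index q is out of range for the length-max(0,n) array.
def Pre_seq_rev (n : Int) (p : List (List Int)) : Prop :=
  ∀ op ∈ p, op.length = 1 → PySem.Raise.InRange n.toNat (op.getD 0 0)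
instance (n : Int) (p : List (List Int)) : Decidable (Pre_seq_rev n p) := by
  unfold Pre_seq_rev PySem.Raise.InRange; infer_instance

def pvWitness_seq_rev : Int × List (List Int) := (5, [[1, 3], [2], [0, 4], [0]])

def Spec_seq_rev (n : Int) (p : List (List Int)) (out : Int) : Prop := out = seq_rev_alt n p
instance (n : Int) (p : List (List Int)) (out : Int) : Decidable (Spec_seq_rev n p out) := by
  unfold Spec_seq_rev; infer_instance

-- ===== CLAIM (what is proved, stated in full; the proofs are below) =====
def Claim_equal_seq_rev : Prop := ∀ (n : Int) (p : List (List Int)), Dom_seq_rev n p → Pre_seq_rev n p → Spec_seq_rev n p (seq_rev n p)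

-- ===== LEMMAS AND PROOFS =====

lemma clampIdx_eq_pyBoundB (N : Nat) (i : Int) :
    ((PySem.List.clampIdx N i : Nat) : Int) = pyBoundB (N : Int) i := by
  unfold PySem.List.clampIdx pyBoundB
  split_ifs with h1 h2 <;> push_cast <;> omega

lemma clampIdx_le' (N : Nat) (i : Int) : PySem.List.clampIdx N i ≤ N := by
  unfold PySem.List.clampIdx; split_ifs <;> omega

-- reversing the clamped slice of the identity-shaped array is composition with applyRev
lemma revSlice_map_range (n : Int) (N : Nat) (hN : N = n.toNat) (G : Int → Int) (x y : Int) :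
    revSlice ((List.range N).map (fun (j : Nat) => G (j : Int))) x y
      = (List.range N).map (fun (j : Nat) => G (applyRev n [x, y] (j : Int))) := by
  rcases Nat.eq_zero_or_pos N with h0 | hpos
  · subst h0; simp [revSlice]
  · have hn : ((N : Nat) : Int) = n := by omega
    have hlen : ((List.range N).map (fun (j : Nat) => G (j : Int))).length = N := by simp
    have happ : ∀ q : Int, applyRev n [x, y] q
        = if ((PySem.List.clampIdx N x : Nat) : Int) ≤ q ∧
             q < ((PySem.List.clampIdx N (y + 1) : Nat) : Int)
          then ((PySem.List.clampIdx N x : Nat) : Int)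
                 + ((PySem.List.clampIdx N (y + 1) : Nat) : Int) - 1 - q
          else q := by
      intro q; simp only [applyRev, clampIdx_eq_pyBoundB, hn]; simp
    unfold revSlice
    rw [hlen]
    have hloN := clampIdx_le' N x
    have hhiN := clampIdx_le' N (y + 1)
    generalize PySem.List.clampIdx N x = lo at *
    generalize PySem.List.clampIdx N (y + 1) = hi at *
    by_cases hle : hi ≤ lo
    · rw [if_pos hle]
      apply List.ext_getElem (by simp)
      intro k h1 h2
      simp only [List.getElem_map, List.getElem_range] at *
      rw [happ, if_neg (by omega)]
    · rw [Nat.not_le] at hle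
      rw [if_neg (by omega)]
      apply List.ext_getElem (by simp; omega)
      intro k h1 h2
      simp only [List.length_map, List.length_range] at h2
      rw [List.getElem_map, List.getElem_range, happ]
      rcases lt_or_ge k lo with hk | hk
      · rw [if_neg (by push_cast; omega)]
        rw [List.getElem_append_left (by simp [hlen]; omega),
            List.getElem_append_left (by simp [hlen]; omega),
            List.getElem_take, List.getElem_map, List.getElem_range]
      · rcases lt_or_ge k hi with hk2 | hk2
        · rw [if_pos (by push_cast; omega)]
          rw [List.getElem_append_left (by simp [hlen]; omega),
              List.getElem_append_right (by simp [hlen]; omega),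
              List.getElem_reverse, List.getElem_take, List.getElem_drop,
              List.getElem_map, List.getElem_range]
          congr 1
          simp only [List.length_take, List.length_drop, List.length_map, List.length_range]
          push_cast
          omega
        · rw [if_neg (by push_cast; omega)]
          rw [List.getElem_append_right (by simp [hlen]; omega),
              List.getElem_drop, List.getElem_map, List.getElem_range]
          congr 1
          simp only [List.length_append, List.length_take, List.length_reverse,
            List.length_drop, List.length_map, List.length_range]
          omega

-- an in-range read of the identity-shaped array is G at the normalised index
lemma pyGetD_map_range_inrange (n : Int) (N : Nat) (hN : N = n.toNat) (G : Int → Int)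
    (q : Int) (hq : PySem.Raise.InRange N q) :
    PySem.List.pyGetD ((List.range N).map (fun (j : Nat) => G (j : Int))) q 0
      = G (if q < 0 then q + n else q) := by
  obtain ⟨hq1, hq2⟩ := hq
  have hpos : 0 < N := by by_contra h; omega
  have hn : ((N : Nat) : Int) = n := by omega
  simp only [PySem.List.pyGetD, PySem.List.pyGet?, PySem.List.pyIdx?, List.length_map,
    List.length_range]
  by_cases h0 : 0 ≤ q
  · rw [if_pos h0, if_pos (by omega)]
    simp only [Option.bind]
    rw [List.getElem?_map, List.getElem?_range (by omega)]
    simp only [Option.map_some, Option.getD_some]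
    rw [if_neg (by omega)]
    congr 1; omega
  · rw [if_neg h0, if_pos (by omega)]
    simp only [Option.bind]
    rw [List.getElem?_map, List.getElem?_range (by omega)]
    simp only [Option.map_some, Option.getD_some]
    rw [if_pos (by omega)]
    congr 1; omega

lemma applyRev_not_two (n : Int) (op : List Int) (h : op.length ≠ 2) (q : Int) :
    applyRev n op q = q := by simp [applyRev, h]

-- invariant: A's array stays the identity array seen through the reversals done so far,
-- and A's accumulated readings sum to B's running total
lemma main_inv (n : Int) (rest : List (List Int)) :
    ∀ (pre : List (List Int)) (res : List Int),
      (∀ op ∈ rest, op.length = 1 → PySem.Raise.InRange n.toNat (op.getD 0 0)) →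
      ((rest.foldl seq_revStep
        ((List.range n.toNat).map (fun (j : Nat) => pre.foldr (applyRev n) (j : Int)), res)).2).sum
        = altGo n pre rest res.sum := by
  induction rest with
  | nil => intro pre res _; simp [altGo]
  | cons op rest' ih =>
    intro pre res hpre
    have hrest : ∀ o ∈ rest', o.length = 1 → PySem.Raise.InRange n.toNat (o.getD 0 0) := by
      intro o ho; exact hpre o (List.mem_cons_of_mem _ ho)
    simp only [List.foldl_cons]
    by_cases h2 : op.length = 2
    · obtain ⟨x, y, rfl⟩ := List.length_eq_two.mp h2
      simp only [seq_revStep, if_pos h2, List.getD]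
      rw [show altGo n pre ([x, y] :: rest') res.sum
            = altGo n (pre ++ [[x, y]]) rest' res.sum by
          rw [altGo]; simp]
      simp only [show ([x, y][0]?.getD 0) = x from rfl, show ([x, y][1]?.getD 0) = y from rfl]
      rw [show revSlice (List.map (fun (j : Nat) => List.foldr (applyRev n) (j : Int) pre) (List.range n.toNat)) x y
            = (List.range n.toNat).map (fun (j : Nat) => List.foldr (applyRev n) (applyRev n [x, y] (j : Int)) pre)
          from revSlice_map_range n n.toNat rfl (fun i => pre.foldr (applyRev n) i) x y]
      rw [show (fun (j : Nat) => pre.foldr (applyRev n) (applyRev n [x, y] (j : Int)))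
            = (fun (j : Nat) => (pre ++ [[x, y]]).foldr (applyRev n) (j : Int)) by
          funext j; rw [List.foldr_append]; rfl]
      exact ih (pre ++ [[x, y]]) res hrest
    · by_cases h1 : op.length = 1
      · obtain ⟨q, rfl⟩ := List.length_eq_one_iff.mp h1
        simp only [seq_revStep, if_neg h2, if_pos h1]
        have hq : PySem.Raise.InRange n.toNat q := by
          have := hpre [q] (List.mem_cons_self) h1
          simpa using this
        simp only [show ([q].getD 0 0) = q from rfl]
        rw [show PySem.List.pyGetD (List.map (fun (j : Nat) => List.foldr (applyRev n) (j : Int) pre) (List.range n.toNat)) q 0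
              = List.foldr (applyRev n) (if q < 0 then q + n else q) pre
            from pyGetD_map_range_inrange n n.toNat rfl (fun i => pre.foldr (applyRev n) i) q hq]
        rw [show (fun (j : Nat) => pre.foldr (applyRev n) (j : Int))
              = (fun (j : Nat) => (pre ++ [[q]]).foldr (applyRev n) (j : Int)) by
            funext j; rw [List.foldr_append]
            simp only [List.foldr_cons, List.foldr_nil]
            rw [applyRev_not_two n [q] (by simp) _]]
        rw [ih (pre ++ [[q]]) _ hrest]
        rw [altGo]
        simp [show ([q].getD 0 0) = q from rfl]
      · simp only [seq_revStep, if_neg h2, if_neg h1]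
        rw [show (fun (j : Nat) => pre.foldr (applyRev n) (j : Int))
              = (fun (j : Nat) => (pre ++ [op]).foldr (applyRev n) (j : Int)) by
            funext j; rw [List.foldr_append]
            simp only [List.foldr_cons, List.foldr_nil]
            rw [applyRev_not_two n op h2 _]]
        rw [ih (pre ++ [op]) res hrest, altGo]
        simp [h1]

-- ===== VERDICT (by name: the statement is the Claim_ definition above) =====
theorem seq_rev_spec : Claim_equal_seq_rev := by
  intro n p _ hpre
  unfold Spec_seq_rev seq_rev seq_rev_alt
  have h0 : PySem.List.pyRange 0 n 1
      = (List.range n.toNat).map (fun (j : Nat) => ([] : List (List Int)).foldr (applyRev n) (j : Int)) := by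
    rw [PySem.List.pyRange_one]
    simp
  rw [h0, main_inv n p [] [] hpre]
  simp
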